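-- pv_equiv track=rewrite | github.com/moleece/aoc_23 | 2024/michael/22/solution.py | simulateSequence
-- ===== SOURCE A (Python) =====
-- def simulateSequence(seed, length):
--     n = seed
--     ns = [n]
--     for i in range(length):
--         x = n << 6
--         n = n ^ x
--         n = n & 0xffffff
--         x = n >> 5
--         n = n ^ x
--         n = n & 0xffffff
--         x = n << 11
--         n = n ^ x
--         n = n & 0xffffff
--         ns.append(n % 10)
--     return ns
-- ===== SOURCE B (Python) =====
-- # Table-driven variant: the 24-bit xorshift step is GF(2)-linear, so one step is a
-- # matrix-vector product with the precomputed column images of the 24 basis bits.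
-- _COLS = [137283, 274566, 549132, 1098264, 2196528, 4391009, 8782018, 786820,
--          1573640, 3147280, 6294560, 12589120, 8401024, 24832, 49664, 99328,
--          198656, 397312, 270336, 540672, 1081344, 2162688, 4325376, 8650752]
--
-- def _step(s):
--     out = 0
--     for i in range(24):
--         if (s >> i) & 1:
--             out ^= _COLS[i]
--     return out
--
-- def simulateSequence(seed, length):
--     result = [seed]
--     s = seed & 0xffffff
--     for _ in range(length):
--         s = _step(s)
--         result.append(s % 10)
--     return result
-- ===== Notes on version B (the rewrite author's own statement) =====
-- stated objective: alternative
-- what changed: B exploits that the 24-bit xorshift step is GF(2)-linear: instead of A's inline xor/shift/mask stages per iteration, B steps by xoring hardcoded precomputed column constants (the step's image of each basis bit) for every set bit of the masked state.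
import Mathlib
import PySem

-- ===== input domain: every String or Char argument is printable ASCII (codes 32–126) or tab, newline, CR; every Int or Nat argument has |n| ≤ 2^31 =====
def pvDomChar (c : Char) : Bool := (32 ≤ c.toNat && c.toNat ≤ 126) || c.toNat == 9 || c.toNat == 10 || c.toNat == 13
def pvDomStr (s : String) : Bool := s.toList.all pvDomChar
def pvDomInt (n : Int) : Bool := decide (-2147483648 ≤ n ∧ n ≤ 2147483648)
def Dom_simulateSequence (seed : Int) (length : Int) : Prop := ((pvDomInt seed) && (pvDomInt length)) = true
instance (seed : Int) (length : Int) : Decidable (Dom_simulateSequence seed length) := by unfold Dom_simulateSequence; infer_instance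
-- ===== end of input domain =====

-- B replaces A's inline three-stage xorshift step by a table-driven step: the 24-bit step is
-- GF(2)-linear, so B xors precomputed basis-column constants for the set bits (alternative).

-- ===== PORT A =====
-- the body of A's for-loop: three xor/shift/mask stages, then append n % 10; ns is the accumulator
def pvSimLoop (n : Int) (k : Nat) (ns : List Int) : List Int :=
  match k with
  | 0 => ns
  | k + 1 =>
    let x := n <<< (6:Nat)
    let n1 := PySem.Int.bxor n x
    let n2 := PySem.Int.band n1 16777215
    let x2 := n2 >>> (5:Nat)
    let n3 := PySem.Int.bxor n2 x2
    let n4 := PySem.Int.band n3 16777215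
    let x3 := n4 <<< (11:Nat)
    let n5 := PySem.Int.bxor n4 x3
    let n6 := PySem.Int.band n5 16777215
    pvSimLoop n6 k (ns ++ [PySem.Int.mod n6 10])

def simulateSequence (seed : Int) (length : Int) : List Int :=
  pvSimLoop seed length.toNat [seed]

-- ===== PORT B =====
-- Source B's _COLS: the image of each of the 24 basis bits under the xorshift step (hardcoded there)
def pvCols : List Int := [137283, 274566, 549132, 1098264, 2196528, 4391009, 8782018, 786820,
  1573640, 3147280, 6294560, 12589120, 8401024, 24832, 49664, 99328,
  198656, 397312, 270336, 540672, 1081344, 2162688, 4325376, 8650752]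

-- Source B's _step: xor together the column of every set bit of s
-- ('s >> i' is exact as 's >>> i.toNat' since every i in range(24) is nonnegative)
def pvStepAlt (s : Int) : Int :=
  (PySem.List.pyRange 0 24 1).foldl
    (fun out i => if PySem.Int.band (s >>> i.toNat) 1 ≠ 0
                  then PySem.Int.bxor out (PySem.List.pyGetD pvCols i 0) else out) 0

-- the for-loop of Source B's simulateSequence: step, append s' % 10
def pvAltLoop (s : Int) (k : Nat) (acc : List Int) : List Int :=
  match k with
  | 0 => acc
  | k + 1 =>
    let s' := pvStepAlt s
    pvAltLoop s' k (acc ++ [PySem.Int.mod s' 10])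

def simulateSequence_alt (seed : Int) (length : Int) : List Int :=
  pvAltLoop (PySem.Int.band seed 16777215) length.toNat [seed]

-- ===== PRECONDITION & SPEC =====
def Spec_simulateSequence (seed : Int) (length : Int) (out : List Int) : Prop := out = simulateSequence_alt seed length
instance (seed : Int) (length : Int) (out : List Int) : Decidable (Spec_simulateSequence seed length out) := by unfold Spec_simulateSequence; infer_instance

-- ===== CLAIM (what is proved, stated in full; the proofs are below) =====
def Claim_equal_simulateSequence : Prop := ∀ (seed : Int) (length : Int), Dom_simulateSequence seed length → Spec_simulateSequence seed length (simulateSequence seed length)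

-- ===== LEMMAS AND PROOFS =====

-- A's loop body as a step function (definitionally the let-chain of pvSimLoop)
def pvStepA (n : Int) : Int :=
  PySem.Int.band (PySem.Int.bxor
    (PySem.Int.band (PySem.Int.bxor
      (PySem.Int.band (PySem.Int.bxor n (n <<< (6:Nat))) 16777215)
      ((PySem.Int.band (PySem.Int.bxor n (n <<< (6:Nat))) 16777215) >>> (5:Nat))) 16777215)
    ((PySem.Int.band (PySem.Int.bxor
      (PySem.Int.band (PySem.Int.bxor n (n <<< (6:Nat))) 16777215)
      ((PySem.Int.band (PySem.Int.bxor n (n <<< (6:Nat))) 16777215) >>> (5:Nat))) 16777215) <<< (11:Nat))) 16777215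

-- Nat-level stages of the step
def stage1N (m : Nat) : Nat := (m ^^^ (m <<< 6)) &&& 16777215
def stage2N (m : Nat) : Nat := (m ^^^ (m >>> 5)) &&& 16777215
def stage3N (m : Nat) : Nat := (m ^^^ (m <<< 11)) &&& 16777215
def gN (m : Nat) : Nat := stage3N (stage2N (stage1N m))

-- the low 24 bits of an Int, as Python's n & 0xffffff computes them
def mlow (n : Int) : Nat := (PySem.Int.band n 16777215).toNat

theorem maskBit (j : Nat) : (16777215 : Nat).testBit j = decide (j < 24) := by
  rw [show (16777215:ℕ) = 2^24 - 1 by norm_num, Nat.testBit_two_pow_sub_one]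

theorem stage1N_lin (x y : Nat) : stage1N (x ^^^ y) = stage1N x ^^^ stage1N y := by
  apply Nat.eq_of_testBit_eq; intro j
  simp only [stage1N, Nat.testBit_and, Nat.testBit_xor, Nat.testBit_shiftLeft, maskBit]
  cases x.testBit j <;> cases y.testBit j <;> cases x.testBit (j-6) <;> cases y.testBit (j-6)
    <;> cases decide (j ≥ 6) <;> cases decide (j < 24) <;> rfl

theorem stage2N_lin (x y : Nat) : stage2N (x ^^^ y) = stage2N x ^^^ stage2N y := by
  apply Nat.eq_of_testBit_eq; intro j
  simp only [stage2N, Nat.testBit_and, Nat.testBit_xor, Nat.testBit_shiftRight, maskBit]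
  cases x.testBit j <;> cases y.testBit j <;> cases x.testBit (5+j) <;> cases y.testBit (5+j)
    <;> cases decide (j < 24) <;> rfl

theorem stage3N_lin (x y : Nat) : stage3N (x ^^^ y) = stage3N x ^^^ stage3N y := by
  apply Nat.eq_of_testBit_eq; intro j
  simp only [stage3N, Nat.testBit_and, Nat.testBit_xor, Nat.testBit_shiftLeft, maskBit]
  cases x.testBit j <;> cases y.testBit j <;> cases x.testBit (j-11) <;> cases y.testBit (j-11)
    <;> cases decide (j ≥ 11) <;> cases decide (j < 24) <;> rfl

theorem gN_lin (x y : Nat) : gN (x ^^^ y) = gN x ^^^ gN y := by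
  simp [gN, stage1N_lin, stage2N_lin, stage3N_lin]

theorem gN_lt (m : Nat) : gN m < 16777216 := by
  have := Nat.and_le_right (n := stage2N (stage1N m) ^^^ (stage2N (stage1N m) <<< 11)) (m := 16777215)
  simp only [gN, stage3N]; omega

theorem stage1N_mask (m : Nat) : stage1N (m &&& 16777215) = stage1N m := by
  apply Nat.eq_of_testBit_eq; intro j
  simp only [stage1N, Nat.testBit_and, Nat.testBit_xor, Nat.testBit_shiftLeft, maskBit]
  by_cases h24 : j < 24 <;> by_cases h6 : j ≥ 6 <;>
    simp [h24, h6, show ∀ (h:j≥6) (h2:j<24), j-6 < 24 by omega]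

theorem tb_compl (a j : Nat) : (16777215 - (16777215 &&& a)).testBit j
    = (decide (j < 24) && !a.testBit j) := by
  have hx : (16777215 &&& a) < 2^24 := by
    have := Nat.and_le_left (n := 16777215) (m := a); omega
  have h1 : (16777215 : ℕ) - (16777215 &&& a) = 2^24 - ((16777215 &&& a) + 1) := by omega
  rw [h1, Nat.testBit_two_pow_sub_succ hx]
  simp [Nat.testBit_and, maskBit]
  by_cases h : j < 24 <;> simp [h]

theorem tb63 (a j : Nat) : (64 * a + 63).testBit j = (decide (j < 6) || a.testBit (j - 6)) := by
  have h := Nat.testBit_two_pow_mul_add a (show (63:ℕ) < 2^6 by norm_num) j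
  rw [show 64 * a + 63 = 2^6 * a + 63 by ring, h]
  by_cases hj : j < 6
  · rw [if_pos hj, show (63:ℕ) = 2^6 - 1 by norm_num, Nat.testBit_two_pow_sub_one]
    simp [hj]
  · rw [if_neg hj]; simp [hj]

theorem stage1N_compl (a : Nat) :
    stage1N (16777215 - (16777215 &&& a)) = (a ^^^ (64 * a + 63)) &&& 16777215 := by
  apply Nat.eq_of_testBit_eq; intro j
  simp only [stage1N, Nat.testBit_and, Nat.testBit_xor, Nat.testBit_shiftLeft, maskBit,
    tb_compl, tb63]
  by_cases h24 : j < 24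
  · by_cases h6 : 6 ≤ j
    · simp [h24, h6, show ¬(j < 6) by omega, show j - 6 < 24 by omega]
    · simp [h24, h6, show j < 6 by omega]
  · simp [h24]

theorem band_val (n : Int) : PySem.Int.band n 16777215 =
    if 0 ≤ n then ((n.toNat &&& 16777215 : Nat) : Int)
    else ((16777215 - (16777215 &&& (-n-1).toNat) : Nat) : Int) := by
  have hM : Int.toNat 16777215 = 16777215 := rfl
  by_cases h : 0 ≤ n
  · rw [if_pos h, PySem.Int.band, if_pos h, if_pos (by norm_num : (0:ℤ) ≤ 16777215), hM]
  · rw [if_neg h, PySem.Int.band, if_neg h, if_pos (by norm_num : (0:ℤ) ≤ 16777215), hM,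
      Nat.and_comm]

theorem band_cast (n : Int) : PySem.Int.band n 16777215 = ((mlow n : Nat) : Int) := by
  rw [mlow, band_val]
  by_cases h : 0 ≤ n <;> simp [h]

theorem mlow_lt (n : Int) : mlow n < 16777216 := by
  rw [mlow, band_val]
  by_cases h : 0 ≤ n <;> simp [h]
  · have : (n.toNat &&& 16777215) ≤ 16777215 := Nat.and_le_right
    omega
  · omega

theorem natcast_mask (m : Nat) (h : m < 16777216) : m &&& 16777215 = m := by
  rw [show (16777215:ℕ) = 2^24 - 1 by norm_num, Nat.and_two_pow_sub_one_eq_mod,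
    Nat.mod_eq_of_lt (by omega)]

theorem mlow_natCast (m : Nat) : mlow ((m : Nat) : Int) = m &&& 16777215 := by
  rw [mlow, band_val, if_pos (by positivity), Int.toNat_natCast, Int.toNat_natCast]

theorem stage1A (n : Int) :
    PySem.Int.band (PySem.Int.bxor n (n <<< (6:Nat))) 16777215 = ((stage1N (mlow n) : Nat) : Int) := by
  by_cases h : 0 ≤ n
  · lift n to ℕ using h with m
    rw [← Int.natCast_shiftLeft, PySem.Int.bxor_natCast,
      show (16777215:ℤ) = ((16777215:ℕ):ℤ) from rfl, PySem.Int.band_natCast,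
      mlow_natCast, stage1N_mask]
    rfl
  · obtain ⟨a, hn⟩ : ∃ a:ℕ, n = -((a:ℤ)+1) := ⟨(-n-1).toNat, by omega⟩
    have hx : n <<< (6:Nat) = -(((64*a+63:ℕ):ℤ)+1) := by
      rw [Int.shiftLeft_eq, hn]; push_cast; ring
    have hxor : PySem.Int.bxor n (n <<< (6:Nat)) = ((a ^^^ (64*a+63) : Nat) : ℤ) := by
      rw [PySem.Int.bxor, hx, if_neg h, if_neg (by push_cast; omega)]
      congr 2
      · omega
      · push_cast; omega
    rw [hxor, show (16777215:ℤ) = ((16777215:ℕ):ℤ) from rfl, PySem.Int.band_natCast]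
    have hmlow : mlow n = 16777215 - (16777215 &&& a) := by
      rw [mlow, band_val, if_neg h, Int.toNat_natCast,
        show (-n-1).toNat = a by omega]
    rw [hmlow, stage1N_compl]

theorem stage2A (m : Nat) :
    PySem.Int.band (PySem.Int.bxor ((m : Nat) : Int) (((m : Nat) : Int) >>> (5:Nat))) 16777215
      = ((stage2N m : Nat) : Int) := by
  rw [← Int.natCast_shiftRight, PySem.Int.bxor_natCast,
    show (16777215:ℤ) = ((16777215:ℕ):ℤ) from rfl, PySem.Int.band_natCast]
  rfl

theorem stage3A (m : Nat) :
    PySem.Int.band (PySem.Int.bxor ((m : Nat) : Int) (((m : Nat) : Int) <<< (11:Nat))) 16777215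
      = ((stage3N m : Nat) : Int) := by
  rw [← Int.natCast_shiftLeft, PySem.Int.bxor_natCast,
    show (16777215:ℤ) = ((16777215:ℕ):ℤ) from rfl, PySem.Int.band_natCast]
  rfl

theorem stepA_eq (n : Int) : pvStepA n = ((gN (mlow n) : Nat) : Int) := by
  rw [pvStepA, stage1A, stage2A, stage3A]
  rfl

theorem colsVal : ∀ i : Nat, i < 24 → PySem.List.pyGetD pvCols (i : Int) 0 = ((gN (2^i) : Nat) : Int) := by
  decide

theorem condIff (m K : Nat) : (PySem.Int.band ((m:ℤ) >>> ((K:Nat):ℤ)) 1 ≠ 0) ↔ m.testBit K = true := by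
  rw [Int.shiftRight_natCast, show (1:ℤ) = ((1:ℕ):ℤ) from rfl, PySem.Int.band_natCast]
  rw [Nat.and_one_is_mod]
  rw [Nat.testBit_eq_decide_div_mod_eq, Nat.shiftRight_eq_div_pow]
  constructor
  · intro h
    have : (m / 2^K) % 2 ≠ 0 := by exact_mod_cast h
    simp; omega
  · intro h
    simp at h
    intro hc
    have : (m / 2^K) % 2 = 0 := by exact_mod_cast hc
    omega

theorem mod_xor_bit (m k : Nat) :
    m % 2^(k+1) = (m % 2^k) ^^^ (if m.testBit k then 2^k else 0) := by
  apply Nat.eq_of_testBit_eq; intro j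
  rw [Nat.testBit_mod_two_pow, Nat.testBit_xor, Nat.testBit_mod_two_pow]
  by_cases hjk : j = k
  · subst hjk
    by_cases hb : m.testBit j <;> simp [hb, Nat.testBit_two_pow_self]
  · have : (if m.testBit k then 2^k else 0).testBit j = false := by
      by_cases hb : m.testBit k <;>
        simp [hb, Ne.symm hjk]
    rw [this]
    by_cases h1 : j < k + 1 <;> by_cases h2 : j < k <;> simp [h1, h2] <;> omega

theorem foldInv (m : Nat) (K : Nat) (hK : K ≤ 24) :
    (PySem.List.pyRange 0 (K : Int) 1).foldl
      (fun out i => if PySem.Int.band (((m : Nat) : Int) >>> i.toNat) 1 ≠ 0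
                    then PySem.Int.bxor out (PySem.List.pyGetD pvCols i 0) else out) 0
      = ((gN (m % 2^K) : Nat) : Int) := by
  induction K with
  | zero =>
    rw [pow_zero, Nat.mod_one]
    rfl
  | succ K ih =>
    have hK' : K ≤ 24 := by omega
    rw [show ((K+1 : Nat) : Int) = (K : Int) + 1 by push_cast; ring,
      PySem.List.pyRange_one_succ_right (by positivity), List.foldl_append,
      ih hK']
    simp only [List.foldl_cons, List.foldl_nil, Int.toNat_natCast]
    by_cases hb : m.testBit K
    · rw [if_pos (by rw [condIff]; exact hb), colsVal K (by omega), PySem.Int.bxor_natCast,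
        ← gN_lin, mod_xor_bit m K, if_pos hb]
    · rw [if_neg (by rw [condIff]; simp [hb]), mod_xor_bit, if_neg hb]
      simp

theorem stepAlt_eq (m : Nat) (h : m < 16777216) :
    pvStepAlt ((m : Nat) : Int) = ((gN m : Nat) : Int) := by
  rw [pvStepAlt, show (24:ℤ) = ((24:Nat):ℤ) from rfl, foldInv m 24 (by omega),
    Nat.mod_eq_of_lt (show m < 2^24 by omega)]

theorem loopEq (k : Nat) (n : Int) (acc : List Int) :
    pvSimLoop n k acc = pvAltLoop (PySem.Int.band n 16777215) k acc := by
  induction k generalizing n acc with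
  | zero => rfl
  | succ k ih =>
    have hstepA : pvSimLoop n (k+1) acc = pvSimLoop (pvStepA n) k (acc ++ [PySem.Int.mod (pvStepA n) 10]) := rfl
    have hstepB : pvAltLoop (PySem.Int.band n 16777215) (k+1) acc
        = pvAltLoop (pvStepAlt (PySem.Int.band n 16777215)) k
            (acc ++ [PySem.Int.mod (pvStepAlt (PySem.Int.band n 16777215)) 10]) := rfl
    have hs : pvStepAlt (PySem.Int.band n 16777215) = pvStepA n := by
      rw [band_cast, stepAlt_eq (mlow n) (mlow_lt n), stepA_eq]
    have hmask : PySem.Int.band (pvStepA n) 16777215 = pvStepA n := by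
      rw [stepA_eq, show (16777215:ℤ) = ((16777215:ℕ):ℤ) from rfl, PySem.Int.band_natCast,
        natcast_mask _ (gN_lt _)]
    rw [hstepA, hstepB, hs, ih, hmask]

-- ===== VERDICT (by name: the statement is the Claim_ definition above) =====
theorem simulateSequence_spec : Claim_equal_simulateSequence := by
  intro seed length _
  unfold Spec_simulateSequence simulateSequence simulateSequence_alt
  exact loopEq length.toNat seed [seed]
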